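-- pv_equiv track=rewrite | github.com/MaoYingrong/Simulation_science | simulation_01.py | generate_changed_series
-- ===== SOURCE A (Python) =====
-- import itertools
--
-- def generate_changed_series(series, num_change):
--     """Generate all possible series that can be obtained by changing a specified number of elements in the series"""
--     series_list = list(series)
--     length = len(series_list)
--     index_combinations = itertools.combinations(range(length), num_change)
--
--     changed_series = []
--     for indices in index_combinations:
--         new_series = series_list[:]
--         for index in indices:
--             new_series[index] = 1 if new_series[index] == 0 else 0
--         changed_series.append(new_series)
--
--     return changed_series
-- ===== SOURCE B (Python) =====
-- def generate_changed_series(series, num_change):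
--     """Generate all possible series that can be obtained by changing a specified number of elements in the series"""
--     series_list = list(series)
--
--     def go(i, k):
--         if i == len(series_list):
--             return [[]] if k == 0 else []
--         flipped = (1 if series_list[i] == 0 else 0)
--         with_flip = [[flipped] + tail for tail in go(i + 1, k - 1)] if k > 0 else []
--         without_flip = [[series_list[i]] + tail for tail in go(i + 1, k)]
--         return with_flip + without_flip
--
--     return go(0, num_change)
-- ===== Notes on version B (the rewrite author's own statement) =====
-- stated objective: alternative
-- what changed: Replaced the itertools.combinations-of-indices plus copy-and-flip loop with a single recursive descent over positions that builds each output series directly, branching flip-first then keep to reproduce the lexicographic order.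
import Mathlib
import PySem

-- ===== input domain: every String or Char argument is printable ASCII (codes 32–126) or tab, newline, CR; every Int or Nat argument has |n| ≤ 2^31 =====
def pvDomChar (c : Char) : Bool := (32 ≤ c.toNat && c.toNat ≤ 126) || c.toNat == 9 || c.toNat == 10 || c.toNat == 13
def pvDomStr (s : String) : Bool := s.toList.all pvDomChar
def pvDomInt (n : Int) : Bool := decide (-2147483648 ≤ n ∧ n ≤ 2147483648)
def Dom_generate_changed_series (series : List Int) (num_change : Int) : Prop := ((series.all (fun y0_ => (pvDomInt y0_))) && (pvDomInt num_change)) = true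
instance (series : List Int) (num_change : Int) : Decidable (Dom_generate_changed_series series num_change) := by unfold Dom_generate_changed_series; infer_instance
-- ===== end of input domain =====

-- B replaces the combinations-of-indices + copy-and-flip loop of A with one recursive
-- descent over positions building each series directly (flip branch first, then keep).

-- ===== PORT A =====
-- itertools.combinations(range(length), k) in lexicographic order (standard recursive form)
def pvCombs (l : List Nat) (k : Nat) : List (List Nat) :=
  match k, l with
  | 0, _ => [[]]
  | _ + 1, [] => []
  | k + 1, x :: xs => (pvCombs xs k).map (fun c => x :: c) ++ pvCombs xs (k + 1)

-- the inner 'for index in indices: new_series[index] = 1 if new_series[index] == 0 else 0'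
def pvApply (ns : List Int) (indices : List Nat) : List Int :=
  indices.foldl (fun ns i => ns.set i (if ns.getD i 0 = 0 then 1 else 0)) ns

def generate_changed_series (series : List Int) (num_change : Int) : List (List Int) :=
  let series_list := series
  let length := series_list.length
  let index_combinations := pvCombs (List.range length) num_change.toNat
  index_combinations.foldl (fun acc indices => acc ++ [pvApply series_list indices]) []

-- ===== PORT B =====
def pvGo (series : List Int) (k : Int) : List (List Int) :=
  match series with
  | [] => if k = 0 then [[]] else []
  | x :: xs =>
      (if k > 0 then (pvGo xs (k - 1)).map (fun t => (if x = 0 then 1 else 0) :: t) else [])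
      ++ (pvGo xs k).map (fun t => x :: t)

def generate_changed_series_alt (series : List Int) (num_change : Int) : List (List Int) :=
  pvGo series num_change

-- ===== PRECONDITION & SPEC =====
-- Pre_ excludes negative num_change, on which A raises ValueError (itertools.combinations).
def Pre_generate_changed_series (series : List Int) (num_change : Int) : Prop := 0 ≤ num_change
instance (series : List Int) (num_change : Int) : Decidable (Pre_generate_changed_series series num_change) := by unfold Pre_generate_changed_series; infer_instance
def pvWitness_generate_changed_series : List Int × Int := ([0, 1, 0], 2)

def Spec_generate_changed_series (series : List Int) (num_change : Int) (out : List (List Int)) : Prop := out = generate_changed_series_alt series num_change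
instance (series : List Int) (num_change : Int) (out : List (List Int)) : Decidable (Spec_generate_changed_series series num_change out) := by unfold Spec_generate_changed_series; infer_instance

-- ===== CLAIM (what is proved, stated in full; the proofs are below) =====
def Claim_equal_generate_changed_series : Prop := ∀ (series : List Int) (num_change : Int), Dom_generate_changed_series series num_change → Pre_generate_changed_series series num_change → Spec_generate_changed_series series num_change (generate_changed_series series num_change)

-- ===== LEMMAS AND PROOFS =====

-- shifting all indices by one skips the head of the series
lemma pvApply_map_succ (is : List Nat) (h : Int) (t : List Int) :
    pvApply (h :: t) (is.map Nat.succ) = h :: pvApply t is := by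
  induction is generalizing h t with
  | nil => rfl
  | cons i is ih =>
      simp only [pvApply, List.map_cons, List.foldl_cons] at *
      rw [show ((h :: t).set (i+1) _ : List Int) = h :: t.set i (if t.getD i 0 = 0 then 1 else 0)
        by simp]
      exact ih _ _

lemma pvCombs_map_succ (l : List Nat) (k : Nat) :
    pvCombs (l.map Nat.succ) k = (pvCombs l k).map (List.map Nat.succ) := by
  induction l generalizing k with
  | nil => cases k <;> rfl
  | cons x xs ih =>
      cases k with
      | zero => rfl
      | succ k => simp [pvCombs, ih, Function.comp]

lemma pvMain (series : List Int) (k : Nat) :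
    (pvCombs (List.range series.length) k).map (pvApply series) = pvGo series (k : Int) := by
  induction series generalizing k with
  | nil =>
      cases k with
      | zero => rfl
      | succ k => simp [pvCombs, pvGo]; omega
  | cons x xs ih =>
      cases k with
      | zero =>
          have h0 := ih 0
          simp only [pvCombs, List.map_cons, List.map_nil, Nat.cast_zero] at *
          have : pvApply xs [] = xs := rfl
          rw [this] at h0
          simp [pvGo, ← h0, pvApply]
      | succ k =>
          have hrange : List.range (x :: xs).length = 0 :: (List.range xs.length).map Nat.succ := by
            simp [List.range_succ_eq_map]
          rw [hrange]
          simp only [pvCombs, List.map_append, List.map_map, pvCombs_map_succ]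
          have hgo : pvGo (x :: xs) ((k + 1 : Nat) : Int)
              = (pvGo xs (((k + 1 : Nat) : Int) - 1)).map (fun t => (if x = 0 then 1 else 0) :: t)
                ++ (pvGo xs ((k + 1 : Nat) : Int)).map (fun t => x :: t) := by
            simp [pvGo]
          rw [hgo]
          have hc1 : (((k + 1 : Nat) : Int) - 1) = (k : Int) := by push_cast; ring
          rw [hc1, ← ih k, ← ih (k + 1)]
          congr 1
          · rw [List.map_map]
            apply List.map_congr_left
            intro is _
            simp only [Function.comp]
            show pvApply (x :: xs) (0 :: is.map Nat.succ) = (if x = 0 then 1 else 0) :: pvApply xs is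
            simp only [pvApply, List.foldl_cons]
            have : ((x :: xs).set 0 (if (x :: xs).getD 0 0 = 0 then 1 else 0))
                = (if x = 0 then 1 else 0) :: xs := by simp
            rw [this]
            exact pvApply_map_succ is _ xs
          · rw [List.map_map]
            apply List.map_congr_left
            intro is _
            exact pvApply_map_succ is x xs

-- ===== VERDICT (by name: the statement is the Claim_ definition above) =====
theorem generate_changed_series_spec : Claim_equal_generate_changed_series := by
  intro series num_change _ hpre
  unfold Spec_generate_changed_series generate_changed_series generate_changed_series_alt
  rw [PySem.List.foldl_append_singleton_eq_map]
  have : (num_change.toNat : Int) = num_change := Int.toNat_of_nonneg hpre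
  rw [← this]
  exact pvMain series num_change.toNat
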